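-- pv_equiv track=rewrite | github.com/feryah/RI | indexation.py | findMultiWords
-- ===== SOURCE A (Python) =====
-- def findMultiWords(tokens, listTerms):
--     """
--     permet de trouver les expressions polylexicales d'un texte
--     :param tokens: les tokens
--     :param listTerms: la liste d'expressions
--     :return: une liste des tokens, y compris des expressions polylexicales
--     """
--     result = []
--     index = 0
--     max_index = len(tokens)
--     while index < max_index:
--         word = None
--         for size in range(5, 0, -1):
--             if index + size > max_index:
--                 continue
--             pieces = tokens[index:(index + size)] #Un candidat polylexical d'une certaine taille
--             piece = ""
--             for x in pieces:
--                 piece = piece + ' ' + x #On met les tokens dans une seule chaîne de caractères "piece" pour faciliter la comparaisons avec le dico qu'on vient de créer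
--             piece = piece.strip(' ')
--             if piece.lower() in listTerms:
--                 word = piece
--                 result.append(word)
--                 index = index + size
--                 break
--         if word == None:
--             index = index + 1
--     return result
-- ===== SOURCE B (Python) =====
-- def findMultiWords(tokens, listTerms):
--     """Single forward scan per position: extend the candidate phrase one token at a
--     time over a 5-token window, keeping the longest match found, with terms in a set."""
--     termset = set(listTerms)
--     result = []
--     n = len(tokens)
--     i = 0
--     while i < n:
--         piece = ""
--         k = 0
--         best = None  # (length, word) of the longest match starting at i
--         for tok in tokens[i:i + 5]:
--             piece = piece + ' ' + tok
--             k += 1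
--             word = piece.strip(' ')
--             if word.lower() in termset:
--                 best = (k, word)
--         if best is None:
--             i += 1
--         else:
--             result.append(best[1])
--             i += best[0]
--     return result
-- ===== Notes on version B (the rewrite author's own statement) =====
-- stated objective: faster
-- what changed: Replaces A's descending per-size rescan (rebuilding each candidate join from scratch and testing it with linear membership in the term list) by a single ascending pass over the 5-token window that extends the candidate phrase one token at a time and keeps the longest match, looked up in a set built once from listTerms.
import Mathlib
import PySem

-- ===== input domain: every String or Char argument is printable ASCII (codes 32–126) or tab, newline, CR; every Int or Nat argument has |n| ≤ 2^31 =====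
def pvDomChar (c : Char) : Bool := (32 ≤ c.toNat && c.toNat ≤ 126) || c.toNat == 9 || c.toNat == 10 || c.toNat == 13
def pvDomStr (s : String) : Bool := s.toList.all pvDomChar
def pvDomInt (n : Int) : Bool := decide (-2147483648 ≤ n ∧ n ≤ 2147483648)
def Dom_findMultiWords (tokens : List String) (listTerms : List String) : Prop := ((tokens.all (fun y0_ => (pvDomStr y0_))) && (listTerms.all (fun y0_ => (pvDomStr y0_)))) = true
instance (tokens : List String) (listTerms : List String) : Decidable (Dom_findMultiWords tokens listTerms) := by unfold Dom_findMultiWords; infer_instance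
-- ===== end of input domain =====

-- B replaces A's per-size descending rescan (rebuilding each candidate join from scratch and
-- testing it against the term LIST) with a single ascending pass over the 5-token window that
-- extends the phrase incrementally and keeps the longest match, looked up in a SET of terms.

-- ===== PORT A =====
-- inner 'for size in range(5, 0, -1)' loop of A, over the (concrete) size list [5,4,3,2,1];
-- returns (appended word, new index) on a match ('break'), none when the loop falls through
def findMultiWordsInnerA (tokens listTerms : List String) (maxIndex index : Nat) :
    List Nat → Option (String × Nat)
  | [] => none
  | size :: rest =>
    if index + size > maxIndex then
      findMultiWordsInnerA tokens listTerms maxIndex index rest   -- continue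
    else
      let pieces := PySem.List.slice tokens (some (index : Int)) (some ((index : Int) + (size : Int)))
      let piece := pieces.foldl (fun p x => p ++ " " ++ x) ""
      let piece := PySem.Str.stripChars piece " "
      if listTerms.contains (PySem.Str.lower piece) then
        some (piece, index + size)                                -- append, advance, break
      else
        findMultiWordsInnerA tokens listTerms maxIndex index rest

-- A's 'while index < max_index' loop; fuel = number of remaining iterations bound (index
-- strictly increases each iteration, so fuel = max_index suffices)
def findMultiWordsLoopA (tokens listTerms : List String) (maxIndex : Nat) :
    Nat → Nat → List String → List String
  | 0, _, result => result
  | fuel + 1, index, result =>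
    if index < maxIndex then
      match findMultiWordsInnerA tokens listTerms maxIndex index [5, 4, 3, 2, 1] with
      | some (w, index') => findMultiWordsLoopA tokens listTerms maxIndex fuel index' (result ++ [w])
      | none => findMultiWordsLoopA tokens listTerms maxIndex fuel (index + 1) result
    else result

def findMultiWords (tokens : List String) (listTerms : List String) : List String :=
  findMultiWordsLoopA tokens listTerms tokens.length tokens.length 0 []

-- ===== PORT B =====
-- B's 'for tok in tokens[i:i+5]' loop: extend piece, bump k, remember the last (longest) match
def findMultiWordsInnerB (termset : PySem.Set String) :
    List String → String → Nat → Option (Nat × String) → Option (Nat × String)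
  | [], _, _, best => best
  | tok :: rest, piece, k, best =>
    let piece := piece ++ " " ++ tok
    let k := k + 1
    let word := PySem.Str.stripChars piece " "
    if PySem.Set.contains termset (PySem.Str.lower word) then
      findMultiWordsInnerB termset rest piece k (some (k, word))
    else
      findMultiWordsInnerB termset rest piece k best

-- B's 'while i < n' loop (same fuel discipline as A's port)
def findMultiWordsLoopB (tokens : List String) (termset : PySem.Set String) (n : Nat) :
    Nat → Nat → List String → List String
  | 0, _, result => result
  | fuel + 1, i, result =>
    if i < n then
      match findMultiWordsInnerB termset
          (PySem.List.slice tokens (some (i : Int)) (some ((i : Int) + 5))) "" 0 none with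
      | none => findMultiWordsLoopB tokens termset n fuel (i + 1) result
      | some (k, w) => findMultiWordsLoopB tokens termset n fuel (i + k) (result ++ [w])
    else result

def findMultiWords_alt (tokens : List String) (listTerms : List String) : List String :=
  findMultiWordsLoopB tokens (PySem.Set.ofList listTerms) tokens.length tokens.length 0 []

-- ===== PRECONDITION & SPEC =====
def Spec_findMultiWords (tokens : List String) (listTerms : List String) (out : List String) : Prop := out = findMultiWords_alt tokens listTerms
instance (tokens : List String) (listTerms : List String) (out : List String) : Decidable (Spec_findMultiWords tokens listTerms out) := by unfold Spec_findMultiWords; infer_instance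

-- ===== CLAIM (what is proved, stated in full; the proofs are below) =====
def Claim_equal_findMultiWords : Prop := ∀ (tokens : List String) (listTerms : List String), Dom_findMultiWords tokens listTerms → Spec_findMultiWords tokens listTerms (findMultiWords tokens listTerms)

-- ===== LEMMAS AND PROOFS =====

-- abstract form of A's inner loop over the suffix t = tokens.drop index
def fmwDescend (terms t : List String) : List Nat → Option (String × Nat)
  | [] => none
  | s :: rest =>
    if s > t.length then fmwDescend terms t rest
    else
      let piece := PySem.Str.stripChars ((t.take s).foldl (fun p x => p ++ " " ++ x) "") " "
      if terms.contains (PySem.Str.lower piece) then some (piece, s)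
      else fmwDescend terms t rest

lemma fmw_contains_ofList (terms : List String) (x : String) :
    PySem.Set.contains (PySem.Set.ofList terms) x = terms.contains x := by
  simp only [PySem.Set.contains_eq_listContains]
  by_cases hx : x ∈ terms
  · simp [PySem.Set.mem_ofList, hx]
  · simp [PySem.Set.mem_ofList, hx]

lemma fmw_innerA_eq_descend (tokens listTerms : List String) (i : Nat) (hi : i ≤ tokens.length) :
    ∀ sizes, findMultiWordsInnerA tokens listTerms tokens.length i sizes
      = (fmwDescend listTerms (tokens.drop i) sizes).map (fun p => (p.1, i + p.2)) := by
  intro sizes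
  induction sizes with
  | nil => simp [findMultiWordsInnerA, fmwDescend]
  | cons s rest ih =>
    simp only [findMultiWordsInnerA, fmwDescend]
    rw [PySem.List.slice_natCast_add]
    by_cases hg : i + s > tokens.length
    · rw [if_pos hg, if_pos (show s > (List.drop i tokens).length from by simp; omega), ih]
    · rw [if_neg hg, if_neg (show ¬ s > (List.drop i tokens).length from by simp; omega)]
      by_cases hc : listTerms.contains (PySem.Str.lower (PySem.Str.stripChars ((List.take s (List.drop i tokens)).foldl (fun p x => p ++ " " ++ x) "") " ")) = true
      · rw [if_pos hc, if_pos hc]; rfl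
      · rw [if_neg hc, if_neg hc]; exact ih

-- A's inner loop never looks past the first 5 tokens of the suffix
lemma fmw_descend_take5 (terms t : List String) :
    ∀ sizes, (∀ s ∈ sizes, s ≤ 5) → fmwDescend terms t sizes = fmwDescend terms (t.take 5) sizes := by
  intro sizes
  induction sizes with
  | nil => intro _; rfl
  | cons s rest ih =>
    intro h
    have hs : s ≤ 5 := h s (by simp)
    have hrest : ∀ x ∈ rest, x ≤ 5 := fun x hx => h x (by simp [hx])
    simp only [fmwDescend]
    have hlen : s > (t.take 5).length ↔ s > t.length := by
      simp only [List.length_take]; omega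
    have htake : (t.take 5).take s = t.take s := by
      rw [List.take_take]; congr 1; omega
    by_cases hg : s > t.length
    · rw [if_pos hg, if_pos (hlen.mpr hg), ih hrest]
    · rw [if_neg hg, if_neg (fun hc => hg (hlen.mp hc)), htake]
      split_ifs with hc
      · rfl
      · exact ih hrest

-- the per-position step: B's ascending longest-match scan over the 5-token window computes
-- exactly what A's descending first-match scan computes (case bash over the window's shape)
lemma fmw_innerB_eq_descend (terms t : List String) :
    findMultiWordsInnerB (PySem.Set.ofList terms) (t.take 5) "" 0 none
      = (fmwDescend terms t [5, 4, 3, 2, 1]).map (fun p => (p.2, p.1)) := by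
  rw [fmw_descend_take5 terms t [5, 4, 3, 2, 1] (by simp)]
  have hw : (t.take 5).length ≤ 5 := by simp
  generalize (t.take 5) = w at *
  rcases w with _ | ⟨a, _ | ⟨b, _ | ⟨c, _ | ⟨d, _ | ⟨e, _ | ⟨f, rest⟩⟩⟩⟩⟩⟩ <;>
    first
    | (simp only [findMultiWordsInnerB, fmwDescend, fmw_contains_ofList, List.foldl,
        List.length_cons, List.length_nil, List.take, Nat.reduceAdd, Nat.reduceLT,
        gt_iff_lt, if_false]
       split_ifs <;> rfl)
    | (exfalso; simp only [List.length_cons] at hw; omega)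

lemma fmw_loop_eq (tokens listTerms : List String) :
    ∀ fuel i result, findMultiWordsLoopA tokens listTerms tokens.length fuel i result
      = findMultiWordsLoopB tokens (PySem.Set.ofList listTerms) tokens.length fuel i result := by
  intro fuel
  induction fuel with
  | zero => intro i result; rfl
  | succ fuel ih =>
    intro i result
    simp only [findMultiWordsLoopA, findMultiWordsLoopB]
    by_cases hi : i < tokens.length
    · rw [if_pos hi, if_pos hi]
      have hslice : PySem.List.slice tokens (some (i : Int)) (some ((i : Int) + 5))
          = (tokens.drop i).take 5 := by
        have h5 := PySem.List.slice_natCast_add (xs := tokens) (j := i) (n := 5)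
        simpa using h5
      rw [fmw_innerA_eq_descend tokens listTerms i (le_of_lt hi) [5, 4, 3, 2, 1],
        hslice, fmw_innerB_eq_descend]
      cases h : fmwDescend listTerms (tokens.drop i) [5, 4, 3, 2, 1] with
      | none => simpa using ih (i + 1) result
      | some p => simpa using ih (i + p.2) (result ++ [p.1])
    · rw [if_neg hi, if_neg hi]

-- ===== VERDICT (by name: the statement is the Claim_ definition above) =====
theorem findMultiWords_spec : Claim_equal_findMultiWords := by
  intro tokens listTerms _
  unfold Spec_findMultiWords findMultiWords findMultiWords_alt
  exact fmw_loop_eq tokens listTerms tokens.length 0 []
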